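-- pv_equiv track=rewrite | github.com/vSteps/Python | Codeforces/Lista 10/saltadores_alegres.py | saltador_alegre
-- ===== SOURCE A (Python) =====
-- def saltador_alegre(n, sequencia):
--     diferencas = set()
--
--     for i in range(1, n):
--         diff = abs(sequencia[i] - sequencia[i - 1])
--         if diff < 1 or diff >= n or diff in diferencas:
--             return False
--         diferencas.add(diff)
--
--     return True
-- ===== SOURCE B (Python) =====
-- def saltador_alegre(n, sequencia):
--     diffs = sorted(abs(sequencia[i] - sequencia[i - 1]) for i in range(1, n))
--     return diffs == list(range(1, n))
-- ===== Notes on version B (the rewrite author's own statement) =====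
-- stated objective: alternative
-- what changed: Replaces A's incremental hash-set scan with early exit by sort-based verification: sort the adjacent absolute differences and compare the sorted list element-wise to list(range(1, n)); no set and no per-element membership test, correct because the differences are valid iff they are a permutation of 1..n-1.
-- outside the precondition, e.g. on saltador_alegre(5, [0, 10]): A returns False, B raises IndexError
import Mathlib
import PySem

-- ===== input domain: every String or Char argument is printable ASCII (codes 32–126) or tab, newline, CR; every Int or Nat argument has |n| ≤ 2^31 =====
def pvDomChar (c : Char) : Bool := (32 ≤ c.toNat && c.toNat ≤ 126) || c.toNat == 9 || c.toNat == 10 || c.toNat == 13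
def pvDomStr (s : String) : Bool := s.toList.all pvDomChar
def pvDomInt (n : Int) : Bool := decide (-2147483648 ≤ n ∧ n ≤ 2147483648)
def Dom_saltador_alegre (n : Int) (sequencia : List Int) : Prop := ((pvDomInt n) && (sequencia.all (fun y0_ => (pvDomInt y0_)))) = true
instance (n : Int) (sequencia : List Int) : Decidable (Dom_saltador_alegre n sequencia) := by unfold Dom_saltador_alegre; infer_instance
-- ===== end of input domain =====

-- B replaces A's early-exit scan with a running seen-set by sort-based verification: sort the
-- adjacent absolute differences and compare the sorted list element-wise to list(range(1, n))
-- (alternative algorithm; Pre_ excludes n > len(sequencia), where A raises IndexError unless an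
-- invalid difference is met first while B always raises).


-- ===== PORT A =====
-- the for-loop of A: counter i runs over range(1, n) lazily (as Python's range does),
-- carrying the running set 'diferencas'
def saltadorLoop (n : Int) (seq : List Int) (i : Int) (difs : PySem.Set Int) : Bool :=
  if h : i < n then
    let diff := |PySem.List.pyGetD seq i 0 - PySem.List.pyGetD seq (i - 1) 0|
    if diff < 1 ∨ n ≤ diff ∨ diff ∈ difs then false
    else saltadorLoop n seq (i + 1) (PySem.Set.add difs diff)
  else true
termination_by (n - i).toNat
decreasing_by omega

def saltador_alegre (n : Int) (sequencia : List Int) : Bool :=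
  saltadorLoop n sequencia 1 PySem.Set.empty

-- ===== PORT B =====
def saltador_alegre_alt (n : Int) (sequencia : List Int) : Bool :=
  let diffs := PySem.List.sorted
    ((PySem.List.pyRange 1 n 1).map
      (fun i => |PySem.List.pyGetD sequencia i 0 - PySem.List.pyGetD sequencia (i - 1) 0|))
    (fun x => x) false
  diffs == PySem.List.pyRange 1 n 1

-- ===== PRECONDITION & SPEC =====
-- Pre_ excludes n > len(sequencia): there the generator of B always raises IndexError, while A
-- raises IndexError too unless an invalid difference makes it return False first (see cites).
def Pre_saltador_alegre (n : Int) (sequencia : List Int) : Prop :=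
  n ≤ (sequencia.length : Int) ∨ n ≤ 1
instance (n : Int) (sequencia : List Int) : Decidable (Pre_saltador_alegre n sequencia) := by
  unfold Pre_saltador_alegre; infer_instance
def pvWitness_saltador_alegre : Int × List Int := (4, [10, 11, 13, 16])

def Spec_saltador_alegre (n : Int) (sequencia : List Int) (out : Bool) : Prop := out = saltador_alegre_alt n sequencia
instance (n : Int) (sequencia : List Int) (out : Bool) : Decidable (Spec_saltador_alegre n sequencia out) := by unfold Spec_saltador_alegre; infer_instance

-- ===== CLAIM (what is proved, stated in full; the proofs are below) =====
def Claim_equal_saltador_alegre : Prop := ∀ (n : Int) (sequencia : List Int), Dom_saltador_alegre n sequencia → Pre_saltador_alegre n sequencia → Spec_saltador_alegre n sequencia (saltador_alegre n sequencia)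

-- ===== LEMMAS AND PROOFS =====

-- proof-side restatement of A's loop over the explicit index list
def saltadorLoopL (n : Int) (seq : List Int) (idxs : List Int) (difs : PySem.Set Int) : Bool :=
  match idxs with
  | [] => true
  | i :: rest =>
    let diff := |PySem.List.pyGetD seq i 0 - PySem.List.pyGetD seq (i - 1) 0|
    if diff < 1 ∨ n ≤ diff ∨ diff ∈ difs then false
    else saltadorLoopL n seq rest (PySem.Set.add difs diff)

-- the lazy counter loop of port A equals the list loop over range(i, n)
theorem saltadorLoop_eq_list (n : Int) (seq : List Int) (i : Int) (s : PySem.Set Int) :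
    saltadorLoop n seq i s = saltadorLoopL n seq (PySem.List.pyRange i n 1) s := by
  rw [saltadorLoop]
  split_ifs with h
  · rw [PySem.List.pyRange_one_cons h, saltadorLoopL]
    simp only []
    split_ifs with h2
    · rfl
    · exact saltadorLoop_eq_list n seq (i + 1) _
  · rw [PySem.List.pyRange_one]
    have h0 : (n - i).toNat = 0 := by omega
    rw [h0]
    rfl
termination_by (n - i).toNat
decreasing_by omega

-- A's loop succeeds iff the produced differences are pairwise distinct, in range, and avoid the seed set
theorem saltadorLoop_char (n : Int) (seq : List Int) (l : List Int) (s : PySem.Set Int) :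
    saltadorLoopL n seq l s = true ↔
      ((l.map (fun i => |PySem.List.pyGetD seq i 0 - PySem.List.pyGetD seq (i - 1) 0|)).Nodup ∧
       ∀ d ∈ l.map (fun i => |PySem.List.pyGetD seq i 0 - PySem.List.pyGetD seq (i - 1) 0|),
         (1 ≤ d ∧ d < n) ∧ d ∉ s) := by
  induction l generalizing s with
  | nil => simp [saltadorLoopL]
  | cons i rest ih =>
    simp only [saltadorLoopL, List.map_cons, List.nodup_cons, List.mem_cons]
    split_ifs with h
    · constructor
      · intro hfalse; cases hfalse
      · rintro ⟨⟨hnotmem, hnd⟩, hall⟩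
        have := hall _ (Or.inl rfl)
        rcases h with h | h | h
        · omega
        · omega
        · exact absurd h this.2
    · rw [ih]
      push Not at h
      constructor
      · rintro ⟨hnd, hall⟩
        refine ⟨⟨fun hmem => (hall _ hmem).2 ((PySem.Set.mem_add _ _ _).mpr (Or.inr rfl)), hnd⟩, ?_⟩
        rintro d (rfl | hd)
        · exact ⟨⟨by omega, by omega⟩, h.2.2⟩
        · have := hall d hd
          refine ⟨this.1, fun hds => this.2 ((PySem.Set.mem_add _ _ _).mpr (Or.inl hds))⟩
      · rintro ⟨⟨hnotmem, hnd⟩, hall⟩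
        refine ⟨hnd, fun d hd => ?_⟩
        have := hall d (Or.inr hd)
        refine ⟨this.1, fun hmem => ?_⟩
        rcases (PySem.Set.mem_add _ _ _).mp hmem with hds | rfl
        · exact this.2 hds
        · exact hnotmem hd

-- pigeonhole: a list is a permutation of a nodup list of equal length iff it is nodup and a subset
theorem perm_iff_nodup_subset {α : Type} [DecidableEq α]
    (xs ys : List α) (hys : ys.Nodup) (hlen : xs.length = ys.length) :
    xs.Perm ys ↔ (xs.Nodup ∧ ∀ x ∈ xs, x ∈ ys) := by
  constructor
  · intro hp
    exact ⟨hp.nodup_iff.mpr hys, fun x hx => hp.mem_iff.mp hx⟩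
  · rintro ⟨hnd, hsub⟩
    exact (List.subperm_of_subset hnd hsub).perm_of_length_le (by omega)

-- sorted(diffs) == range(1, n) holds iff diffs is a permutation of range(1, n)
theorem sorted_eq_range_iff_perm (xs : List Int) (n : Int) :
    PySem.List.sorted xs (fun x => x) false = PySem.List.pyRange 1 n 1 ↔
    xs.Perm (PySem.List.pyRange 1 n 1) := by
  constructor
  · intro h
    exact ((h ▸ PySem.List.sorted_perm xs (fun x => x) false)).symm
  · intro hp
    exact PySem.List.sorted_id_eq_of_perm_of_pairwise _ _ hp.symm
      ((PySem.List.pairwise_lt_pyRange_one 1 n).imp le_of_lt)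

theorem saltador_alegre_eq (n : Int) (sequencia : List Int) :
    saltador_alegre n sequencia = saltador_alegre_alt n sequencia := by
  have hR : (PySem.List.pyRange 1 n 1).Nodup := PySem.List.nodup_pyRange_one 1 n
  rw [Bool.eq_iff_iff]
  rw [saltador_alegre, saltadorLoop_eq_list, saltadorLoop_char, saltador_alegre_alt]
  simp only [beq_iff_eq]
  rw [sorted_eq_range_iff_perm, perm_iff_nodup_subset _ _ hR (by simp)]
  constructor
  · rintro ⟨hnd, hall⟩
    exact ⟨hnd, fun d hd => PySem.List.mem_pyRange_one.mpr ⟨(hall d hd).1.1, (hall d hd).1.2⟩⟩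
  · rintro ⟨hnd, hall⟩
    refine ⟨hnd, fun d hd => ?_⟩
    have := PySem.List.mem_pyRange_one.mp (hall d hd)
    exact ⟨⟨this.1, this.2⟩, by simp [PySem.Set.empty]⟩

-- ===== VERDICT (by name: the statement is the Claim_ definition above) =====
theorem saltador_alegre_spec : Claim_equal_saltador_alegre := by
  intro n sequencia _ _
  unfold Spec_saltador_alegre
  exact saltador_alegre_eq n sequencia
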